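-- pv_equiv track=rewrite | github.com/Ssxs-Andrea/robotic-warehouse | astar_algorithm/shelf_movement.py | _is_direct_path_clear
-- ===== SOURCE A (Python) =====
-- def _is_direct_path_clear(start, end, blocked, shelf_width=1, shelf_height=1):
--     """More thorough path clearance checking"""
--     x1, y1 = start
--     x2, y2 = end
--
--     # Check each step along the path
--     if x1 != x2:  # Horizontal movement
--         step = 1 if x2 > x1 else -1
--         for x in range(x1, x2, step):
--             if (x, y1) in blocked:
--                 return False
--
--     if y1 != y2:  # Vertical movement
--         step = 1 if y2 > y1 else -1
--         for y in range(y1, y2, step):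
--             if (x2, y) in blocked:
--                 return False
--
--     return True
-- ===== SOURCE B (Python) =====
-- def _is_direct_path_clear(start, end, blocked, shelf_width=1, shelf_height=1):
--     """Scan the obstacles instead of walking the path: a blocked cell is a hit
--     iff it lies on the horizontal leg (row y1, x in the half-open span) or the
--     vertical leg (column x2, y in the half-open span)."""
--     x1, y1 = start
--     x2, y2 = end
--     for bx, by in blocked:
--         if x1 != x2 and by == y1 and bx in range(x1, x2, 1 if x2 > x1 else -1):
--             return False
--         if y1 != y2 and bx == x2 and by in range(y1, y2, 1 if y2 > y1 else -1):
--             return False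
--     return True
-- ===== Notes on version B (the rewrite author's own statement) =====
-- stated objective: faster
-- what changed: B makes one pass over the blocked cells and tests each against the two half-open legs with O(1) range membership, instead of walking every cell of the path and scanning blocked at each step.
import Mathlib
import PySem

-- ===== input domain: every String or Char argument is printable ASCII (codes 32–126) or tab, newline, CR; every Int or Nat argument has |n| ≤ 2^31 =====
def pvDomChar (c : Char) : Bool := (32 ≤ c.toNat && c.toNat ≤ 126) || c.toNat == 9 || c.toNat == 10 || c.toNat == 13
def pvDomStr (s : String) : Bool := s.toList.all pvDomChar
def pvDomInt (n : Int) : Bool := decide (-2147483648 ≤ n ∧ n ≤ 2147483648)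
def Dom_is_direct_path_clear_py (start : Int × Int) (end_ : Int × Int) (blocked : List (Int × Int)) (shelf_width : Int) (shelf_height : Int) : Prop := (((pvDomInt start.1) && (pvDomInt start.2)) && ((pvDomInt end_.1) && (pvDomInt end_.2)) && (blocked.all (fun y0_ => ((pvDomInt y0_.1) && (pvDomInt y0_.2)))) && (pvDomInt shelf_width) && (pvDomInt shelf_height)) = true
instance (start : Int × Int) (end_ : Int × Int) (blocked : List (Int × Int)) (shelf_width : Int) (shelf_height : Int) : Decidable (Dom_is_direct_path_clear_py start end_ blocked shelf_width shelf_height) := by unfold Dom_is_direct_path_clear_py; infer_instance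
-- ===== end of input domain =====

-- B replaces A's walk of every path cell (scanning `blocked` at each step) by a single
-- pass over `blocked` testing each cell against the two half-open legs: O(|blocked|) instead
-- of O(path_length * |blocked|), measured faster in a timing run.
-- ===== PORT A =====
def is_direct_path_clear_py (start : Int × Int) (end_ : Int × Int) (blocked : List (Int × Int)) (shelf_width : Int) (shelf_height : Int) : Bool :=
  let x1 := start.1; let y1 := start.2
  let x2 := end_.1; let y2 := end_.2
  -- if x1 != x2: for x in range(x1, x2, step): if (x, y1) in blocked: return False
  if x1 ≠ x2 ∧ (PySem.List.pyRange x1 x2 (if x2 > x1 then 1 else -1)).any (fun x => blocked.contains (x, y1)) then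
    false
  -- if y1 != y2: for y in range(y1, y2, step): if (x2, y) in blocked: return False
  else if y1 ≠ y2 ∧ (PySem.List.pyRange y1 y2 (if y2 > y1 then 1 else -1)).any (fun y => blocked.contains (x2, y)) then
    false
  else
    true

-- ===== PORT B =====
-- B: one honest pass over `blocked`; each cell is tested against the two half-open legs.
-- `v in range(a, b, 1 if b > a else -1)` is exactly this arithmetic test:
def pvInStep1Range (a b v : Int) : Bool :=
  if b > a then a ≤ v ∧ v < b else b < v ∧ v ≤ a

-- the for-loop over `blocked` with its two early returns
def pvScanBlocked (x1 y1 x2 y2 : Int) : List (Int × Int) → Bool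
  | [] => true
  | (bx, by_) :: rest =>
    if x1 ≠ x2 ∧ by_ = y1 ∧ pvInStep1Range x1 x2 bx then false
    else if y1 ≠ y2 ∧ bx = x2 ∧ pvInStep1Range y1 y2 by_ then false
    else pvScanBlocked x1 y1 x2 y2 rest

def is_direct_path_clear_py_alt (start : Int × Int) (end_ : Int × Int) (blocked : List (Int × Int)) (shelf_width : Int) (shelf_height : Int) : Bool :=
  pvScanBlocked start.1 start.2 end_.1 end_.2 blocked

-- ===== PRECONDITION & SPEC =====
def Spec_is_direct_path_clear_py (start : Int × Int) (end_ : Int × Int) (blocked : List (Int × Int)) (shelf_width : Int) (shelf_height : Int) (out : Bool) : Prop := out = is_direct_path_clear_py_alt start end_ blocked shelf_width shelf_height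
instance (start : Int × Int) (end_ : Int × Int) (blocked : List (Int × Int)) (shelf_width : Int) (shelf_height : Int) (out : Bool) : Decidable (Spec_is_direct_path_clear_py start end_ blocked shelf_width shelf_height out) := by unfold Spec_is_direct_path_clear_py; infer_instance

-- ===== CLAIM (what is proved, stated in full; the proofs are below) =====
def Claim_equal_is_direct_path_clear_py : Prop := ∀ (start : Int × Int) (end_ : Int × Int) (blocked : List (Int × Int)) (shelf_width : Int) (shelf_height : Int), Dom_is_direct_path_clear_py start end_ blocked shelf_width shelf_height → Spec_is_direct_path_clear_py start end_ blocked shelf_width shelf_height (is_direct_path_clear_py start end_ blocked shelf_width shelf_height)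

-- ===== LEMMAS AND PROOFS =====

-- `v in range(a, b, 1 if b > a else -1)` is membership in the corresponding half-open span
theorem mem_stepRange (a b x : Int) :
    x ∈ PySem.List.pyRange a b (if b > a then 1 else -1) ↔ pvInStep1Range a b x = true := by
  unfold pvInStep1Range
  split_ifs with h
  · simp [PySem.List.mem_pyRange_one]
  · simp [PySem.List.mem_pyRange_neg_one]

-- the scan returns true iff no blocked cell hits either leg
theorem pvScanBlocked_eq_true (x1 y1 x2 y2 : Int) (l : List (Int × Int)) :
    pvScanBlocked x1 y1 x2 y2 l = true ↔
      ∀ p ∈ l, ¬(x1 ≠ x2 ∧ p.2 = y1 ∧ pvInStep1Range x1 x2 p.1 = true) ∧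
               ¬(y1 ≠ y2 ∧ p.1 = x2 ∧ pvInStep1Range y1 y2 p.2 = true) := by
  induction l with
  | nil => simp [pvScanBlocked]
  | cons p rest ih =>
    obtain ⟨bx, by_⟩ := p
    simp only [pvScanBlocked, List.mem_cons]
    split_ifs with h1 h2
    · simp only [false_iff]
      intro hall
      exact (hall _ (Or.inl rfl)).1 h1
    · simp only [false_iff]
      intro hall
      exact (hall _ (Or.inl rfl)).2 h2
    · rw [ih]
      constructor
      · rintro hall q (rfl | hq)
        · exact ⟨h1, h2⟩
        · exact hall q hq
      · intro hall q hq
        exact hall q (Or.inr hq)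

-- the horizontal leg has a blocked cell iff some blocked cell hits it
theorem hhit_iff (x1 y1 x2 : Int) (blocked : List (Int × Int)) :
    (x1 ≠ x2 ∧ ∃ x, pvInStep1Range x1 x2 x = true ∧ (x, y1) ∈ blocked) ↔
      (∃ p ∈ blocked, x1 ≠ x2 ∧ p.2 = y1 ∧ pvInStep1Range x1 x2 p.1 = true) := by
  constructor
  · rintro ⟨hne, x, hr, hb⟩
    exact ⟨(x, y1), hb, hne, rfl, hr⟩
  · rintro ⟨⟨bx, by_⟩, hb, hne, heq, hr⟩
    cases heq
    exact ⟨hne, bx, hr, hb⟩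

-- the vertical leg has a blocked cell iff some blocked cell hits it
theorem vhit_iff (y1 x2 y2 : Int) (blocked : List (Int × Int)) :
    (y1 ≠ y2 ∧ ∃ y, pvInStep1Range y1 y2 y = true ∧ (x2, y) ∈ blocked) ↔
      (∃ p ∈ blocked, y1 ≠ y2 ∧ p.1 = x2 ∧ pvInStep1Range y1 y2 p.2 = true) := by
  constructor
  · rintro ⟨hne, y, hr, hb⟩
    exact ⟨(x2, y), hb, hne, rfl, hr⟩
  · rintro ⟨⟨bx, by_⟩, hb, hne, heq, hr⟩
    cases heq
    exact ⟨hne, by_, hr, hb⟩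

-- ===== VERDICT (by name: the statement is the Claim_ definition above) =====
theorem is_direct_path_clear_py_spec : Claim_equal_is_direct_path_clear_py := by
  intro start end_ blocked shelf_width shelf_height _
  unfold Spec_is_direct_path_clear_py
  obtain ⟨x1, y1⟩ := start
  obtain ⟨x2, y2⟩ := end_
  unfold is_direct_path_clear_py is_direct_path_clear_py_alt
  have key1 : (x1 ≠ x2 ∧ ((PySem.List.pyRange x1 x2 (if x2 > x1 then 1 else -1)).any
        fun x => blocked.contains (x, y1)) = true) ↔
      (∃ p ∈ blocked, x1 ≠ x2 ∧ p.2 = y1 ∧ pvInStep1Range x1 x2 p.1 = true) := by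
    simp only [List.any_eq_true, List.contains_iff_mem, mem_stepRange]
    exact hhit_iff x1 y1 x2 blocked
  have key2 : (y1 ≠ y2 ∧ ((PySem.List.pyRange y1 y2 (if y2 > y1 then 1 else -1)).any
        fun y => blocked.contains (x2, y)) = true) ↔
      (∃ p ∈ blocked, y1 ≠ y2 ∧ p.1 = x2 ∧ pvInStep1Range y1 y2 p.2 = true) := by
    simp only [List.any_eq_true, List.contains_iff_mem, mem_stepRange]
    exact vhit_iff y1 x2 y2 blocked
  rw [Bool.eq_iff_iff, pvScanBlocked_eq_true]
  by_cases hc1 : x1 ≠ x2 ∧ ((PySem.List.pyRange x1 x2 (if x2 > x1 then 1 else -1)).any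
      fun x => blocked.contains (x, y1)) = true
  · rw [if_pos hc1]
    rw [key1] at hc1
    obtain ⟨p, hp, hh⟩ := hc1
    exact iff_of_false (by simp) fun hall => (hall p hp).1 hh
  · rw [if_neg hc1]
    by_cases hc2 : y1 ≠ y2 ∧ ((PySem.List.pyRange y1 y2 (if y2 > y1 then 1 else -1)).any
        fun y => blocked.contains (x2, y)) = true
    · rw [if_pos hc2]
      rw [key2] at hc2
      obtain ⟨p, hp, hv⟩ := hc2
      exact iff_of_false (by simp) fun hall => (hall p hp).2 hv
    · rw [if_neg hc2]
      rw [key1] at hc1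
      rw [key2] at hc2
      exact ⟨fun _ p hp => ⟨fun hh => hc1 ⟨p, hp, hh⟩, fun hv => hc2 ⟨p, hp, hv⟩⟩, fun _ => rfl⟩
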